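-- pv_equiv track=rewrite | github.com/rancidplanet/yahtzee | play_yahtzee.py | __c_four_of_a_kind
-- ===== SOURCE A (Python) =====
-- def unique_helper(hand):
--
--     #count the unique values
--     unique_list = [[x,0] for x in range(1,6+1)]
--
--     for die in hand:
--         for val in unique_list:
--                 if die == val[0]:
--                     val[1] = val[1] + 1
--
--     unique_list.sort(key = lambda x:x[1], reverse=True)
--
--     return unique_list
--
-- def __c_four_of_a_kind(hand):
--     #return values that are more than three
--     unique_list = unique_helper(hand)
--     ret = []
--     for thing in unique_list:
--         if thing[1] >= 4:
--             ret.append((thing[0],thing[1]))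
--
--     if len(ret) == 0:
--         return None
--     else:
--         return ret
-- ===== SOURCE B (Python) =====
-- def __c_four_of_a_kind(hand):
--     # sort the hand, then scan maximal runs of equal values;
--     # a legal face (1..6) whose run is 4+ long is a four-of-a-kind
--     quads = []
--     s = sorted(hand)
--     i, n = 0, len(s)
--     while i < n:
--         j = i
--         while j < n and s[j] == s[i]:
--             j += 1
--         if 1 <= s[i] <= 6 and j - i >= 4:
--             quads.append((s[i], j - i))
--         i = j
--     quads.sort(key=lambda t: t[1], reverse=True)
--     return quads or None
-- ===== Notes on version B (the rewrite author's own statement) =====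
-- stated objective: alternative
-- what changed: Replaces A's per-face count table (nested loop over a [face,0] table for every die, then sort and filter) with a sort-then-run-scan: sort the hand once, walk maximal runs of equal values, and emit a legal face whose run is 4+ long.
import Mathlib
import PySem

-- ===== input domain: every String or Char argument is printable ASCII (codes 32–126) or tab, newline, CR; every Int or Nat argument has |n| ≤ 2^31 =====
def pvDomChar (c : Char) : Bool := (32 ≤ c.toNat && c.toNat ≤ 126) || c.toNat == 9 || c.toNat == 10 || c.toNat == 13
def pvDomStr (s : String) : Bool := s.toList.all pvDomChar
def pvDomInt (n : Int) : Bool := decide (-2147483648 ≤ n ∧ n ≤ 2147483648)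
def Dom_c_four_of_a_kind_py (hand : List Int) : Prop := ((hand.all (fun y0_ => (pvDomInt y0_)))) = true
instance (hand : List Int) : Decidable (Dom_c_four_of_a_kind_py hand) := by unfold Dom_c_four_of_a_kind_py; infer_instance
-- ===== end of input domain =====

-- B replaces A's per-face count table (nested counting loop, then sort and filter)
-- by sorting the hand once and scanning maximal runs of equal values (alternative).

-- ===== PORT A =====
def uniqueHelper (hand : List Int) : List (Int × Int) :=
  -- unique_list = [[x,0] for x in range(1,6+1)]
  let ul : List (Int × Int) := (PySem.List.pyRange 1 7 1).map (fun x => (x, (0 : Int)))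
  -- for die in hand: for val in unique_list: if die == val[0]: val[1] = val[1] + 1
  let ul := hand.foldl
    (fun acc die => acc.map (fun val => if die == val.1 then (val.1, val.2 + 1) else val)) ul
  -- unique_list.sort(key=lambda x: x[1], reverse=True)
  PySem.List.sorted ul (fun x => x.2) true

def c_four_of_a_kind_py (hand : List Int) : Option (List (Int × Int)) :=
  let ul := uniqueHelper hand
  -- for thing in unique_list: if thing[1] >= 4: ret.append((thing[0], thing[1]))
  let ret := ul.foldl
    (fun acc thing => if 4 ≤ thing.2 then acc ++ [(thing.1, thing.2)] else acc)
    ([] : List (Int × Int))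
  if ret.length = 0 then none else some ret

-- ===== PORT B =====
-- the run scan of B's while loops: j advances over the run of s[i] (takeWhile), the run
-- is appended when the face is legal and the run length is at least 4, and i jumps to j (dropWhile)
def runQuads : List Int → List (Int × Int)
  | [] => []
  | v :: t =>
    let k : Int := ((t.takeWhile (fun x => x == v)).length : Int) + 1
    let rest := runQuads (t.dropWhile (fun x => x == v))
    if 1 ≤ v ∧ v ≤ 6 ∧ 4 ≤ k then (v, k) :: rest else rest
termination_by s => s.length
decreasing_by
  simpa [Nat.lt_succ_iff] using List.length_dropWhile_le (fun x => x == v) t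

def c_four_of_a_kind_py_alt (hand : List Int) : Option (List (Int × Int)) :=
  -- s = sorted(hand); scan maximal runs collecting the quads
  let quads := runQuads (PySem.List.sorted hand (fun x => x) false)
  -- quads.sort(key=lambda t: t[1], reverse=True)
  let quads := PySem.List.sorted quads (fun t => t.2) true
  -- return quads or None
  if quads = [] then none else some quads

-- ===== PRECONDITION & SPEC =====
def Spec_c_four_of_a_kind_py (hand : List Int) (out : Option (List (Int × Int))) : Prop := out = c_four_of_a_kind_py_alt hand
instance (hand : List Int) (out : Option (List (Int × Int))) : Decidable (Spec_c_four_of_a_kind_py hand out) := by unfold Spec_c_four_of_a_kind_py; infer_instance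

-- ===== CLAIM (what is proved, stated in full; the proofs are below) =====
def Claim_equal_c_four_of_a_kind_py : Prop := ∀ (hand : List Int), Dom_c_four_of_a_kind_py hand → Spec_c_four_of_a_kind_py hand (c_four_of_a_kind_py hand)

-- ===== LEMMAS AND PROOFS =====

-- the canonical quad list both programs produce before their final descending sort
def quadList (hand : List Int) : List (Int × Int) :=
  ((PySem.List.pyRange 1 7 1).filter (fun v => decide (4 ≤ (hand.count v : Int)))).map
    (fun v => (v, (hand.count v : Int)))

-- A's counting loop over a face table is the table of counts.
theorem table_foldl_count (hand : List Int) (vs : List Int) (f : Int → Int) :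
    hand.foldl
      (fun acc die => acc.map (fun val => if die == val.1 then (val.1, val.2 + 1) else val))
      (vs.map (fun v => (v, f v)))
    = vs.map (fun v => (v, f v + (hand.count v : Int))) := by
  induction hand generalizing f with
  | nil => simp
  | cons d t ih =>
    simp only [List.foldl_cons, List.map_map]
    have hstep :
        ((fun val : Int × Int => if d == val.1 then (val.1, val.2 + 1) else val) ∘
          (fun v => (v, f v)))
        = fun v => (v, (if d == v then f v + 1 else f v)) := by
      funext v
      by_cases h : d = v <;> simp [h]
    rw [hstep, ih (fun v => if d == v then f v + 1 else f v)]
    refine List.map_congr_left (fun v _ => ?_)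
    by_cases h : d = v <;> (simp [h]; try ring)

-- insert x in front when its key beats every element.
theorem insertBy_front {α : Type} (key : α → Int) (x : α) (zs : List α)
    (h : ∀ z ∈ zs, key z < key x) :
    PySem.List.insertBy (fun a b => decide (key b < key a)) x zs = x :: zs := by
  cases zs with
  | nil => rfl
  | cons z t =>
    have : key z < key x := h z (by simp)
    simp [PySem.List.insertBy, this]

-- filtering commutes with one descending stable insertion, on a descending list.
theorem filter_insertBy {α : Type} (key : α → Int) (p : α → Bool) (x : α) (acc : List α)
    (hacc : acc.Pairwise (fun a b => key b ≤ key a)) :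
    (PySem.List.insertBy (fun a b => decide (key b < key a)) x acc).filter p
    = if p x then PySem.List.insertBy (fun a b => decide (key b < key a)) x (acc.filter p)
      else acc.filter p := by
  induction acc with
  | nil => simp [PySem.List.insertBy]; cases hpx : p x <;> simp [hpx]
  | cons y ys ih =>
    have hy : ∀ z ∈ ys, key z ≤ key y := (List.pairwise_cons.mp hacc).1
    have hys := (List.pairwise_cons.mp hacc).2
    by_cases hb : key y < key x
    · have hins : PySem.List.insertBy (fun a b => decide (key b < key a)) x (y :: ys)
          = x :: y :: ys := by simp [PySem.List.insertBy, hb]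
      rw [hins]
      cases hpx : p x with
      | false => simp [List.filter_cons, hpx]
      | true =>
        cases hpy : p y with
        | true => simp [hpx, hpy, PySem.List.insertBy, hb]
        | false =>
          simp only [List.filter_cons, hpx, hpy, if_pos, Bool.false_eq_true, if_neg,
            not_false_iff]
          rw [insertBy_front key x (ys.filter p)
              (fun z hz => lt_of_le_of_lt (hy z (List.mem_of_mem_filter hz)) hb)]
    · simp only [PySem.List.insertBy, decide_eq_true_eq, hb, if_neg, not_false_iff]
      cases hpx : p x <;> cases hpy : p y <;>
        simp [hpy, ih hys, hpx, PySem.List.insertBy, hb]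

-- filtering commutes with the whole descending stable sort.
theorem filter_sorted_rev {α : Type} (key : α → Int) (p : α → Bool) (xs : List α) :
    (PySem.List.sorted xs key true).filter p
    = PySem.List.sorted (xs.filter p) key true := by
  induction xs using List.reverseRecOn with
  | nil => rfl
  | append_singleton xs x ih =>
    rw [PySem.List.sorted_rev_eq_foldl_insertBy, List.foldl_append, List.foldl_cons,
        List.foldl_nil, ← PySem.List.sorted_rev_eq_foldl_insertBy,
        filter_insertBy key p x _ (PySem.List.sorted_pairwise_rev xs (fun a => key a)),
        List.filter_append, ih]
    cases hpx : p x <;>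
      simp [hpx, PySem.List.sorted_rev_eq_foldl_insertBy, List.foldl_append]

-- A = the descending sort of the canonical quad list (or None when it is empty)
theorem a_eq_canonical (hand : List Int) :
    c_four_of_a_kind_py hand
    = (if PySem.List.sorted (quadList hand) (fun t => t.2) true = [] then none
       else some (PySem.List.sorted (quadList hand) (fun t => t.2) true)) := by
  simp only [c_four_of_a_kind_py, uniqueHelper, quadList]
  have htab := table_foldl_count hand (PySem.List.pyRange 1 7 1) (fun _ => 0)
  simp only [zero_add] at htab
  rw [htab,
      PySem.List.foldl_append_ite (p := fun t : Int × Int => (4:Int) ≤ t.2)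
        (f := fun t : Int × Int => (t.1, t.2)),
      filter_sorted_rev, List.filter_map]
  have hcomp :
      ((fun t : Int × Int => decide ((4:Int) ≤ t.2)) ∘ (fun v : Int => (v, (hand.count v : Int))))
      = fun v : Int => decide (4 ≤ (hand.count v : Int)) := rfl
  rw [hcomp]
  simp only [List.length_eq_zero_iff, List.nil_append, Prod.mk.eta, List.map_id_fun', id_eq]

theorem lt_of_mem_dropWhile (v : Int) (t : List Int) (ht : t.Pairwise (· ≤ ·))
    (hhead : ∀ x ∈ t, v ≤ x) (x : Int) (hx : x ∈ t.dropWhile (fun y => y == v)) : v < x := by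
  induction t with
  | nil => simp at hx
  | cons y r ih =>
    have hyr := (List.pairwise_cons.mp ht).1
    have hr := (List.pairwise_cons.mp ht).2
    by_cases hyv : y = v
    · simp only [List.dropWhile_cons, hyv, BEq.rfl] at hx
      exact ih hr (fun z hz => le_trans (hhead y (by simp)) (by simpa [hyv] using hyr z hz)) hx
    · have hvy : v < y := lt_of_le_of_ne (hhead y (by simp)) (Ne.symm hyv)
      simp only [List.dropWhile_cons, beq_iff_eq, hyv, if_neg, not_false_iff] at hx
      rcases List.mem_cons.mp hx with h | h
      · exact h ▸ hvy
      · exact lt_of_lt_of_le hvy (hyr x h)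

theorem count_head (v : Int) (t : List Int) (ht : t.Pairwise (· ≤ ·))
    (hhead : ∀ x ∈ t, v ≤ x) :
    (v :: t).count v = (t.takeWhile (fun x => x == v)).length + 1 := by
  rw [List.count_cons_self]
  congr 1
  induction t with
  | nil => simp
  | cons y r ih =>
    have hyr := (List.pairwise_cons.mp ht).1
    have hr := (List.pairwise_cons.mp ht).2
    by_cases hyv : y = v
    · subst hyv
      rw [List.count_cons_self, List.takeWhile_cons_of_pos (by simp), List.length_cons]
      rw [ih hr (fun z hz => hyr z hz)]
    · have hvy : v < y := lt_of_le_of_ne (hhead y (by simp)) (Ne.symm hyv)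
      have hnot : v ∉ y :: r := by
        intro hmem
        rcases List.mem_cons.mp hmem with h | h
        · exact hyv h.symm
        · exact absurd (hyr v h) (not_le.mpr hvy)
      rw [List.count_eq_zero.mpr hnot, List.takeWhile_cons_of_neg (by simp [hyv])]
      rfl

theorem count_tail (v w : Int) (t : List Int) (hw : w ≠ v) :
    (v :: t).count w = (t.dropWhile (fun x => x == v)).count w := by
  have h1 : (v :: t).count w = t.count w := by simp [Ne.symm hw]
  rw [h1]
  conv_lhs => rw [← List.takeWhile_append_dropWhile (p := fun x => x == v) (l := t)]
  rw [List.count_append]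
  have h0 : (t.takeWhile (fun x => x == v)).count w = 0 := by
    rw [List.count_eq_zero]
    intro hmem
    have := List.mem_takeWhile_imp hmem
    simp only [beq_iff_eq] at this
    exact hw this
  omega

theorem runQuads_mem_aux (n : Nat) : ∀ (s : List Int), s.length ≤ n → s.Pairwise (· ≤ ·) →
    ∀ p : Int × Int,
    (p ∈ runQuads s ↔ (1 ≤ p.1 ∧ p.1 ≤ 6 ∧ 4 ≤ p.2 ∧ p.2 = (s.count p.1 : Int))) := by
  induction n with
  | zero =>
    intro s hlen hs p
    have hnil : s = [] := List.eq_nil_of_length_eq_zero (Nat.le_zero.mp hlen)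
    subst hnil
    simp only [runQuads, List.not_mem_nil, List.count_nil, false_iff]
    rintro ⟨_, _, h3, h4⟩
    omega
  | succ n ih =>
    intro s hlen hs p
    match s with
    | [] =>
      simp only [runQuads, List.not_mem_nil, List.count_nil, false_iff]
      rintro ⟨_, _, h3, h4⟩
      omega
    | v :: t =>
      have ht := (List.pairwise_cons.mp hs).2
      have hhead := (List.pairwise_cons.mp hs).1
      have htd : (t.dropWhile (fun x => x == v)).Pairwise (· ≤ ·) :=
        List.Pairwise.sublist (List.dropWhile_sublist _) ht
      have hlen' : (t.dropWhile (fun x => x == v)).length ≤ n := by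
        have := List.length_dropWhile_le (fun x => x == v) t
        simp only [List.length_cons] at hlen
        omega
      have ihm := ih (t.dropWhile (fun x => x == v)) hlen' htd
      have hk : (((v :: t).count v : Int)) = ((t.takeWhile (fun x => x == v)).length : Int) + 1 := by
        rw [count_head v t ht hhead]; push_cast; ring
      have hne : ∀ q : Int × Int, q ∈ runQuads (t.dropWhile (fun x => x == v)) → v < q.1 := by
        intro q hq
        have h3 := ((ihm q).mp hq).2.2.1
        have h4 := ((ihm q).mp hq).2.2.2
        have hmem : q.1 ∈ t.dropWhile (fun x => x == v) := by
          rw [← List.count_pos_iff]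
          omega
        exact lt_of_mem_dropWhile v t ht hhead q.1 hmem
      have hct : ∀ w : Int, w ≠ v →
          ((t.dropWhile (fun x => x == v)).count w : Int) = ((v :: t).count w : Int) := by
        intro w hw
        exact congrArg (fun n : Nat => (n : Int)) (count_tail v w t hw).symm
      rw [runQuads]
      by_cases hcond : 1 ≤ v ∧ v ≤ 6 ∧ 4 ≤ ((t.takeWhile (fun x => x == v)).length : Int) + 1
      · rw [if_pos hcond]
        rw [List.mem_cons]
        constructor
        · rintro (rfl | hp)
          · exact ⟨hcond.1, hcond.2.1, hcond.2.2, hk.symm⟩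
          · obtain ⟨h1, h2, h3, h4⟩ := (ihm p).mp hp
            exact ⟨h1, h2, h3, by rw [h4, hct p.1 (ne_of_gt (hne p hp))]⟩
        · rintro ⟨h1, h2, h3, h4⟩
          by_cases hpv : p.1 = v
          · left
            exact Prod.ext hpv (by rw [h4, hpv, hk])
          · right
            exact (ihm p).mpr ⟨h1, h2, h3, by rw [h4, ← hct p.1 hpv]⟩
      · rw [if_neg hcond]
        constructor
        · intro hp
          obtain ⟨h1, h2, h3, h4⟩ := (ihm p).mp hp
          exact ⟨h1, h2, h3, by rw [h4, hct p.1 (ne_of_gt (hne p hp))]⟩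
        · rintro ⟨h1, h2, h3, h4⟩
          by_cases hpv : p.1 = v
          · have h5 := h4
            rw [hpv, hk] at h5
            exact absurd ⟨hpv ▸ h1, hpv ▸ h2, h5 ▸ h3⟩ hcond
          · exact (ihm p).mpr ⟨h1, h2, h3, by rw [h4, ← hct p.1 hpv]⟩

theorem runQuads_mem (s : List Int) (hs : s.Pairwise (· ≤ ·)) (p : Int × Int) :
    p ∈ runQuads s ↔ (1 ≤ p.1 ∧ p.1 ≤ 6 ∧ 4 ≤ p.2 ∧ p.2 = (s.count p.1 : Int)) :=
  runQuads_mem_aux s.length s le_rfl hs p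

theorem runQuads_pairwise_aux (n : Nat) : ∀ (s : List Int), s.length ≤ n → s.Pairwise (· ≤ ·) →
    (runQuads s).Pairwise (fun a b => a.1 < b.1) := by
  induction n with
  | zero =>
    intro s hlen _
    have hnil : s = [] := List.eq_nil_of_length_eq_zero (Nat.le_zero.mp hlen)
    subst hnil
    simp [runQuads]
  | succ n ih =>
    intro s hlen hs
    match s with
    | [] => simp [runQuads]
    | v :: t =>
      have ht := (List.pairwise_cons.mp hs).2
      have hhead := (List.pairwise_cons.mp hs).1
      have htd : (t.dropWhile (fun x => x == v)).Pairwise (· ≤ ·) :=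
        List.Pairwise.sublist (List.dropWhile_sublist _) ht
      have hlen' : (t.dropWhile (fun x => x == v)).length ≤ n := by
        have := List.length_dropWhile_le (fun x => x == v) t
        simp only [List.length_cons] at hlen
        omega
      have ihp := ih (t.dropWhile (fun x => x == v)) hlen' htd
      have ihm := runQuads_mem_aux n (t.dropWhile (fun x => x == v)) hlen' htd
      have hne : ∀ q : Int × Int, q ∈ runQuads (t.dropWhile (fun x => x == v)) → v < q.1 := by
        intro q hq
        have h3 := ((ihm q).mp hq).2.2.1
        have h4 := ((ihm q).mp hq).2.2.2
        have hmem : q.1 ∈ t.dropWhile (fun x => x == v) := by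
          rw [← List.count_pos_iff]
          omega
        exact lt_of_mem_dropWhile v t ht hhead q.1 hmem
      rw [runQuads]
      by_cases hcond : 1 ≤ v ∧ v ≤ 6 ∧ 4 ≤ ((t.takeWhile (fun x => x == v)).length : Int) + 1
      · rw [if_pos hcond]
        exact List.pairwise_cons.mpr ⟨hne, ihp⟩
      · rw [if_neg hcond]
        exact ihp

theorem runQuads_pairwise (s : List Int) (hs : s.Pairwise (· ≤ ·)) :
    (runQuads s).Pairwise (fun a b => a.1 < b.1) :=
  runQuads_pairwise_aux s.length s le_rfl hs

theorem eq_of_pairwise_lt_mem : ∀ (l1 l2 : List (Int × Int)),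
    l1.Pairwise (fun a b => a.1 < b.1) → l2.Pairwise (fun a b => a.1 < b.1) →
    (∀ p, p ∈ l1 ↔ p ∈ l2) → l1 = l2 := by
  intro l1
  induction l1 with
  | nil =>
    intro l2 _ _ hm
    exact (List.eq_nil_iff_forall_not_mem.mpr (fun p hp => List.not_mem_nil ((hm p).mpr hp))).symm
  | cons a t1 ih =>
    intro l2 h1 h2 hm
    have ha1 := (List.pairwise_cons.mp h1).1
    have ht1 := (List.pairwise_cons.mp h1).2
    match l2 with
    | [] => exact absurd ((hm a).mp (by simp)) (List.not_mem_nil)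
    | b :: t2 =>
      have hb2 := (List.pairwise_cons.mp h2).1
      have ht2 := (List.pairwise_cons.mp h2).2
      have hab : a = b := by
        rcases List.mem_cons.mp ((hm a).mp (by simp)) with h | h
        · exact h
        · rcases List.mem_cons.mp ((hm b).mpr (by simp)) with h' | h'
          · exact h'.symm
          · exact absurd (lt_trans (hb2 a h) (ha1 b h')) (lt_irrefl _)
      subst hab
      have hmt : ∀ p, p ∈ t1 ↔ p ∈ t2 := by
        intro p
        constructor
        · intro hp
          rcases List.mem_cons.mp ((hm p).mp (List.mem_cons_of_mem a hp)) with h | h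
          · exact absurd (ha1 p hp) (by rw [h]; exact lt_irrefl _)
          · exact h
        · intro hp
          rcases List.mem_cons.mp ((hm p).mpr (List.mem_cons_of_mem a hp)) with h | h
          · exact absurd (hb2 p hp) (by rw [h]; exact lt_irrefl _)
          · exact h
      rw [ih t2 ht1 ht2 hmt]

theorem runQuads_sorted_eq (hand : List Int) :
    runQuads (PySem.List.sorted hand (fun x => x) false) = quadList hand := by
  have hs : (PySem.List.sorted hand (fun x => x) false).Pairwise (· ≤ ·) :=
    PySem.List.sorted_pairwise hand (fun x => x)
  have hcnt : ∀ w : Int, (PySem.List.sorted hand (fun x => x) false).count w = hand.count w :=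
    fun w => (PySem.List.sorted_perm hand (fun x => x) false).count_eq w
  apply eq_of_pairwise_lt_mem
  · exact runQuads_pairwise _ hs
  · refine List.pairwise_map.mpr ?_
    refine List.Pairwise.filter _ ?_
    exact (PySem.List.pairwise_lt_pyRange_one 1 7).imp (fun h => h)
  · intro p
    rw [runQuads_mem _ hs p]
    simp only [quadList, List.mem_map, List.mem_filter, PySem.List.mem_pyRange_one,
      decide_eq_true_eq, hcnt]
    constructor
    · rintro ⟨h1, h2, h3, h4⟩
      exact ⟨p.1, ⟨⟨h1, by omega⟩, by omega⟩, by rw [← h4]⟩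
    · rintro ⟨v, ⟨⟨hv1, hv2⟩, hv4⟩, rfl⟩
      exact ⟨hv1, by omega, hv4, rfl⟩

-- ===== VERDICT (by name: the statement is the Claim_ definition above) =====
theorem c_four_of_a_kind_py_spec : Claim_equal_c_four_of_a_kind_py := by
  intro hand _
  show c_four_of_a_kind_py hand = c_four_of_a_kind_py_alt hand
  rw [a_eq_canonical]
  simp only [c_four_of_a_kind_py_alt, runQuads_sorted_eq]
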